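-- pv_equiv track=rewrite | github.com/leoopd/learning-python | leetcode/easy/1370.py | sortString
-- ===== SOURCE A (Python) =====
-- def sortString(s: str) -> str:
--     characters = list(s)
--     res = ""
--     while len(characters) > 0:
--         tmp = list(set(characters))
--         tmp.sort()
--         for char in tmp:
--             res += char
--             characters.remove(char)
--         if len(characters) == 0:
--             break
--         tmp = list(set(characters))
--         tmp.sort()
--         for char in list(tmp)[::-1]:
--             res += char
--             characters.remove(char)
--     return res
-- ===== SOURCE B (Python) =====
-- def sortString(s: str) -> str:
--     counts = {}
--     for c in s:
--         counts[c] = counts.get(c, 0) + 1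
--     keys = sorted(counts)
--     out = []
--     asc = True
--     while keys:
--         for c in (keys if asc else reversed(keys)):
--             out.append(c)
--             counts[c] -= 1
--         keys = [c for c in keys if counts[c] > 0]
--         asc = not asc
--     return "".join(out)
-- ===== Notes on version B (the rewrite author's own statement) =====
-- stated objective: faster
-- what changed: B builds a character-frequency dictionary once and sweeps the fixed sorted distinct-key list alternately forward and backward, decrementing counts and filtering exhausted keys, instead of A's repeated set/sort/list.remove passes over the remaining character list.
import Mathlib
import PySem

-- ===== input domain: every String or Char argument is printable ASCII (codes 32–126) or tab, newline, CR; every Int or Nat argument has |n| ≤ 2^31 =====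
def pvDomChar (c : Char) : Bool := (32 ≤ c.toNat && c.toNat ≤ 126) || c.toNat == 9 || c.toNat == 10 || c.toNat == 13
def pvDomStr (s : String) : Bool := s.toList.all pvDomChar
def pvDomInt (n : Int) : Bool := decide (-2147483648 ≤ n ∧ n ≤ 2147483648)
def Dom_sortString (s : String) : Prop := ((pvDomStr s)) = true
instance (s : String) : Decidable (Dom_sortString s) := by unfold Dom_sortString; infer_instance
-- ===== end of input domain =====

-- B replaces A's repeated set/sort/list.remove passes by one frequency dictionary and
-- alternating sweeps over the fixed sorted distinct-key list (objective: faster).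

-- ===== PORT A =====
-- 'res += char; characters.remove(char)': res is carried as its List Char (String.mk at the end);
-- remove? never fails here (char ∈ characters), .getD is the total guard.
def pvStepA (st : List Char × List Char) (c : Char) : List Char × List Char :=
  (st.1 ++ [c], (PySem.List.remove? st.2 c).getD st.2)

-- termination helpers for A's while-loop (cited by decreasing_by)
theorem pvStepA_foldl_len_le (tmp : List Char) : ∀ st : List Char × List Char,
    (tmp.foldl pvStepA st).2.length ≤ st.2.length := by
  induction tmp with
  | nil => intro st; simp
  | cons t ts ih =>
    intro st
    refine le_trans (ih _) ?_
    simp only [pvStepA]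
    by_cases ht : t ∈ st.2
    · rw [PySem.List.remove?_eq_some_erase st.2 t ht, Option.getD_some]
      have := List.length_erase_of_mem ht
      omega
    · rw [(PySem.List.remove?_eq_none_iff st.2 t).mpr ht, Option.getD_none]

theorem pvStepA_foldl_len_lt (tmp : List Char) : ∀ st : List Char × List Char,
    (∃ c ∈ tmp, c ∈ st.2) → (tmp.foldl pvStepA st).2.length < st.2.length := by
  induction tmp with
  | nil => intro st h; simp at h
  | cons t ts ih =>
    intro st h
    by_cases ht : t ∈ st.2
    · have h1 : (pvStepA st t).2.length < st.2.length := by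
        simp only [pvStepA, PySem.List.remove?_eq_some_erase st.2 t ht, Option.getD_some]
        have := List.length_erase_of_mem ht
        have := List.length_pos_of_mem ht
        omega
      exact lt_of_le_of_lt (pvStepA_foldl_len_le ts _) h1
    · obtain ⟨c, hc, hcs⟩ := h
      have hcts : c ∈ ts := by
        rcases List.mem_cons.mp hc with rfl | h2
        · exact absurd hcs ht
        · exact h2
      have hstep : (pvStepA st t) = (st.1 ++ [t], st.2) := by
        simp [pvStepA, (PySem.List.remove?_eq_none_iff st.2 t).mpr ht]
      simpa [List.foldl_cons, hstep] using ih (st.1 ++ [t], st.2) ⟨c, hcts, hcs⟩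

def pvLoopA (chars : List Char) (res : List Char) : List Char :=
  if h : 0 < chars.length then
    -- tmp = list(set(characters)); tmp.sort()
    let tmp := PySem.List.sorted (PySem.Set.ofList chars) (fun x => x) false
    let st1 := tmp.foldl pvStepA (res, chars)
    if st1.2.length = 0 then st1.1
    else
      let tmp2 := PySem.List.sorted (PySem.Set.ofList st1.2) (fun x => x) false
      -- list(tmp)[::-1] is tmp.reverse (PySem.List.slice?_none_none_neg_one)
      let st2 := tmp2.reverse.foldl pvStepA st1
      pvLoopA st2.2 st2.1
  else res
termination_by chars.length
decreasing_by
  have ha : ∃ c ∈ PySem.List.sorted (PySem.Set.ofList chars) (fun x => x) false, c ∈ chars := by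
    cases chars with
    | nil => simp at h
    | cons a t =>
      exact ⟨a, (PySem.List.mem_sorted _ _ _ a).mpr ((PySem.Set.mem_ofList _ a).mpr (by simp)),
        by simp⟩
  calc (tmp2.reverse.foldl pvStepA st1).2.length
      ≤ st1.2.length := pvStepA_foldl_len_le _ _
    _ < chars.length := pvStepA_foldl_len_lt tmp (res, chars) ha

def sortString (s : String) : String := String.mk (pvLoopA s.toList [])

-- ===== PORT B =====
-- 'out.append(c); counts[c] -= 1' (c is always a key of counts; modify's default is the total guard)
def pvStepB (st : PySem.Dict Char Int × List Char) (c : Char) :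
    PySem.Dict Char Int × List Char :=
  (st.1.modify c 0 (· - 1), st.2 ++ [c])

-- termination measure for B's while-loop and its supporting lemmas (cited by decreasing_by)
def pvMeasure (counts : PySem.Dict Char Int) (keys : List Char) : Nat :=
  (keys.map (fun c => (counts.getD c 0).toNat + 1)).sum

theorem pvStepB_foldl_getD (seq : List Char) : ∀ (d : PySem.Dict Char Int) (out : List Char)
    (v : Char), ((seq.foldl pvStepB (d, out)).1).getD v 0 = d.getD v 0 - seq.count v := by
  induction seq with
  | nil => intro d out v; simp
  | cons t ts ih =>
    intro d out v
    simp only [List.foldl_cons, pvStepB, ih, PySem.Dict.getD_modify, List.count_cons]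
    by_cases hv : v = t
    · simp only [hv, beq_self_eq_true, if_pos]
      push_cast
      ring
    · simp only [if_neg hv, beq_iff_eq, if_neg (fun h : t = v => hv h.symm)]
      push_cast
      ring

theorem pvSum_filter_le {α : Type} (l : List α) (f g : α → Nat) (p : α → Bool)
    (h : ∀ c ∈ l, (if p c then g c else 0) ≤ f c) :
    ((l.filter p).map g).sum ≤ (l.map f).sum := by
  induction l with
  | nil => simp
  | cons a t ih =>
    have ha := h a (by simp)
    have ht := ih (fun c hc => h c (by simp [hc]))
    by_cases hp : p a
    · simp only [List.filter_cons, if_pos hp, List.map_cons, List.sum_cons]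
      simp only [if_pos hp] at ha
      omega
    · simp only [List.filter_cons, if_neg hp, List.map_cons, List.sum_cons]
      omega

theorem pvSum_filter_lt {α : Type} (l : List α) (hl : l ≠ []) (f g : α → Nat) (p : α → Bool)
    (h : ∀ c ∈ l, (if p c then g c else 0) < f c) :
    ((l.filter p).map g).sum < (l.map f).sum := by
  cases l with
  | nil => exact absurd rfl hl
  | cons a t =>
    have ha := h a (by simp)
    have ht := pvSum_filter_le t f g p (fun c hc => le_of_lt (h c (by simp [hc])))
    by_cases hp : p a
    · simp only [List.filter_cons, if_pos hp, List.map_cons, List.sum_cons]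
      simp only [if_pos hp] at ha
      omega
    · simp only [List.filter_cons, List.map_cons, List.sum_cons, if_neg hp] at *
      omega

theorem pvMeasure_dec (counts : PySem.Dict Char Int) (keys : List Char) (out : List Char)
    (hne : keys ≠ []) (asc : Bool) :
    pvMeasure ((if asc then keys else keys.reverse).foldl pvStepB (counts, out)).1
        (keys.filter fun c =>
          decide (0 < (((if asc then keys else keys.reverse).foldl pvStepB (counts, out)).1).getD c 0))
      < pvMeasure counts keys := by
  set seq := if asc then keys else keys.reverse with hseq
  have hcnt : ∀ v, seq.count v = keys.count v := by
    intro v; cases asc <;> simp [hseq]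
  refine pvSum_filter_lt keys hne _ _ _ ?_
  intro c hc
  rw [pvStepB_foldl_getD, hcnt c]
  have h1 : 1 ≤ keys.count c := List.one_le_count_iff.mpr hc
  by_cases hp : 0 < counts.getD c 0 - (keys.count c : Int)
  · rw [if_pos (by exact decide_eq_true hp)]
    omega
  · rw [if_neg (by simpa using hp)]
    omega

-- bridge for the unattach form Lean's WF compiler gives pvLoopB's filter (cited by decreasing_by)
theorem pvFilter_attach_unattach {α : Type} (keys : List α) (p : α → Bool) :
    (List.filter (fun x => p x.1) keys.attach).unattach = keys.filter p := by
  show List.map Subtype.val (List.filter ((fun c => p c) ∘ Subtype.val) keys.attach)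
      = keys.filter p
  rw [← List.filter_map]
  congr 1
  exact List.unattach_attach

def pvLoopB (counts : PySem.Dict Char Int) (keys : List Char) (out : List Char) (asc : Bool) :
    List Char :=
  if keys = [] then out
  else
    let seq := if asc then keys else keys.reverse
    let st := seq.foldl pvStepB (counts, out)
    let keys' := keys.filter (fun c => decide (0 < st.1.getD c 0))
    pvLoopB st.1 keys' st.2 (!asc)
termination_by pvMeasure counts keys
decreasing_by
  simp
  rw [pvFilter_attach_unattach keys (fun c => decide (0 <
    (List.foldl pvStepB (counts, out) (if asc = true then keys else keys.reverse)).1.getD c 0))]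
  exact pvMeasure_dec counts keys out (by assumption) asc

def sortString_alt (s : String) : String :=
  let counts := s.toList.foldl (fun d c => d.insert c (d.getD c 0 + 1)) PySem.Dict.empty
  let keys := PySem.List.sorted counts.keys (fun x => x) false
  String.mk (pvLoopB counts keys [] true)

-- ===== PRECONDITION & SPEC =====
def Spec_sortString (s : String) (out : String) : Prop := out = sortString_alt s
instance (s : String) (out : String) : Decidable (Spec_sortString s out) := by
  unfold Spec_sortString; infer_instance

-- ===== CLAIM (what is proved, stated in full; the proofs are below) =====
def Claim_equal_sortString : Prop := ∀ (s : String), Dom_sortString s → Spec_sortString s (sortString s)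

-- ===== LEMMAS AND PROOFS =====

theorem pvStepB_foldl_out (seq : List Char) : ∀ (d : PySem.Dict Char Int) (out : List Char),
    (seq.foldl pvStepB (d, out)).2 = out ++ seq := by
  induction seq with
  | nil => intro d out; simp
  | cons t ts ih => intro d out; simp [List.foldl_cons, pvStepB, ih]


-- an ascending/descending pass of A: emit tmp and erase one occurrence of each of its chars
theorem pvPassA (tmp : List Char) : ∀ (res chars : List Char), (∀ c ∈ tmp, c ∈ chars) →
    tmp.Nodup →
    tmp.foldl pvStepA (res, chars) = (res ++ tmp, tmp.foldl (fun l c => l.erase c) chars) := by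
  induction tmp with
  | nil => intro res chars _ _; simp
  | cons t ts ih =>
    intro res chars hmem hnd
    have ht : t ∈ chars := hmem t (by simp)
    have hstep : pvStepA (res, chars) t = (res ++ [t], chars.erase t) := by
      simp [pvStepA, PySem.List.remove?_eq_some_erase chars t ht]
    have hmem' : ∀ c ∈ ts, c ∈ chars.erase t := by
      intro c hc
      exact (List.mem_erase_of_ne (fun he => (List.nodup_cons.mp hnd).1 (by rw [← he]; exact hc))).mpr
        (hmem c (by simp [hc]))
    simp only [List.foldl_cons, hstep, ih (res ++ [t]) (chars.erase t) hmem'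
      (List.nodup_cons.mp hnd).2]
    simp

theorem pvCountErases (tmp : List Char) : ∀ (chars : List Char), tmp.Nodup → ∀ c,
    (tmp.foldl (fun l c => l.erase c) chars).count c
      = chars.count c - (if c ∈ tmp then 1 else 0) := by
  induction tmp with
  | nil => intro chars _ c; simp
  | cons t ts ih =>
    intro chars hnd c
    simp only [List.foldl_cons]
    rw [ih (chars.erase t) (List.nodup_cons.mp hnd).2 c, List.count_erase]
    have hnt := (List.nodup_cons.mp hnd).1
    by_cases hct : c = t
    · subst hct
      simp [hnt]
    · by_cases hcts : c ∈ ts <;>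
        simp [hct, hcts, Ne.symm hct]

-- folding erase over a list in reverse order yields the same list (erases commute)
theorem pvFoldlErase_erase (ts : List Char) : ∀ (chars : List Char) (t : Char),
    (ts.foldl (fun l c => l.erase c) chars).erase t
      = ts.foldl (fun l c => l.erase c) (chars.erase t) := by
  induction ts with
  | nil => intro chars t; simp
  | cons a ts ih =>
    intro chars t
    simp only [List.foldl_cons]
    rw [ih, List.erase_comm]

theorem pvFoldlErase_reverse (tmp : List Char) : ∀ (chars : List Char),
    tmp.reverse.foldl (fun l c => l.erase c) chars = tmp.foldl (fun l c => l.erase c) chars := by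
  induction tmp with
  | nil => intro chars; simp
  | cons t ts ih =>
    intro chars
    simp only [List.reverse_cons, List.foldl_append, List.foldl_cons, List.foldl_nil, ih]
    rw [pvFoldlErase_erase]

-- the invariant tying A's remaining character list to B's counts dict and key list
def pvInv (chars : List Char) (counts : PySem.Dict Char Int) (keys : List Char) : Prop :=
  (∀ c, counts.getD c 0 = (chars.count c : Int)) ∧
  keys = PySem.List.sorted (PySem.Set.ofList chars) (fun x => x) false

theorem pvKeys_nodup (chars keys : List Char)
    (hk : keys = PySem.List.sorted (PySem.Set.ofList chars) (fun x => x) false) :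
    keys.Nodup ∧ List.Pairwise (· < ·) keys ∧ (∀ c, c ∈ keys ↔ c ∈ chars) := by
  subst hk
  refine ⟨(PySem.List.sorted_ofList_pairwise_lt chars).imp (fun h => ne_of_lt h),
    PySem.List.sorted_ofList_pairwise_lt chars, fun c => ?_⟩
  rw [PySem.List.mem_sorted, PySem.Set.mem_ofList]

-- one pass preserves the invariant: the filtered keys are exactly sorted(set(remaining))
theorem pvInv_step (chars : List Char) (counts : PySem.Dict Char Int) (keys : List Char)
    (hinv : pvInv chars counts keys) (seq : List Char)
    (hseqc : ∀ v, seq.count v = keys.count v)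
    (d' : PySem.Dict Char Int) (hd' : ∀ v, d'.getD v 0 = counts.getD v 0 - seq.count v) :
    pvInv (keys.foldl (fun l c => l.erase c) chars) d'
      (keys.filter fun c => decide (0 < d'.getD c 0)) := by
  obtain ⟨hc, hk⟩ := hinv
  obtain ⟨hnd, hpw, hmem⟩ := pvKeys_nodup chars keys hk
  set chars' := keys.foldl (fun l c => l.erase c) chars with hch
  have hcount : ∀ c, chars'.count c = chars.count c - (if c ∈ keys then 1 else 0) :=
    pvCountErases keys chars hnd
  have hkeyscnt : ∀ c, keys.count c = (if c ∈ keys then 1 else 0) := by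
    intro c
    by_cases h : c ∈ keys
    · simp [h, List.count_eq_one_of_mem hnd h]
    · simp [h, List.count_eq_zero.mpr h]
  have hd'c : ∀ c, d'.getD c 0 = (chars'.count c : Int) := by
    intro c
    rw [hd' c, hseqc c, hc c, hcount c, hkeyscnt c]
    by_cases h : c ∈ keys
    · have : 1 ≤ chars.count c := List.one_le_count_iff.mpr ((hmem c).mp h)
      simp only [h, if_pos]
      push_cast
      omega
    · simp [h]
  refine ⟨hd'c, ?_⟩
  symm
  apply PySem.List.sorted_eq_of_perm_of_pairwise_lt
  · rw [List.perm_ext_iff_of_nodup (hnd.filter _) (PySem.Set.nodup_ofList _)]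
    intro a
    rw [PySem.Set.mem_ofList, List.mem_filter]
    constructor
    · rintro ⟨hak, hpos⟩
      rw [decide_eq_true_iff, hd'c a] at hpos
      refine List.one_le_count_iff.mp ?_
      exact_mod_cast hpos
    · intro ha
      have hpos : 1 ≤ chars'.count a := List.one_le_count_iff.mpr ha
      have haC : a ∈ keys := by
        rw [hmem a]
        refine List.one_le_count_iff.mp ?_
        have := hcount a
        by_cases h : a ∈ chars
        · exact List.one_le_count_iff.mpr h
        · rw [List.count_eq_zero.mpr h] at this
          omega
      refine ⟨haC, ?_⟩
      rw [decide_eq_true_iff, hd'c a]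
      exact_mod_cast hpos
  · exact hpw.sublist List.filter_sublist

theorem pvOfList_eq_nil {l : List Char} (h : PySem.Set.ofList l = []) : l = [] := by
  cases l with
  | nil => rfl
  | cons a t =>
    have ha := (PySem.Set.mem_ofList (a :: t) a).mpr (by simp)
    rw [h] at ha
    simp at ha

-- clean one-round unfoldings of the two loops
theorem pvLoopA_round (chars res : List Char) (h : 0 < chars.length) :
    pvLoopA chars res =
      (if ((PySem.List.sorted (PySem.Set.ofList chars) (fun x => x) false).foldl pvStepA
            (res, chars)).2.length = 0 then
        ((PySem.List.sorted (PySem.Set.ofList chars) (fun x => x) false).foldl pvStepA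
            (res, chars)).1
      else
        pvLoopA
          ((PySem.List.sorted (PySem.Set.ofList
              ((PySem.List.sorted (PySem.Set.ofList chars) (fun x => x) false).foldl pvStepA
                (res, chars)).2) (fun x => x) false).reverse.foldl pvStepA
            ((PySem.List.sorted (PySem.Set.ofList chars) (fun x => x) false).foldl pvStepA
              (res, chars))).2
          ((PySem.List.sorted (PySem.Set.ofList
              ((PySem.List.sorted (PySem.Set.ofList chars) (fun x => x) false).foldl pvStepA
                (res, chars)).2) (fun x => x) false).reverse.foldl pvStepA
            ((PySem.List.sorted (PySem.Set.ofList chars) (fun x => x) false).foldl pvStepA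
              (res, chars))).1) := by
  rw [pvLoopA, dif_pos h]

theorem pvLoopA_nil (res : List Char) : pvLoopA [] res = res := by
  rw [pvLoopA]
  simp

theorem pvLoopB_nil (counts : PySem.Dict Char Int) (out : List Char) (asc : Bool) :
    pvLoopB counts [] out asc = out := by
  rw [pvLoopB]
  simp

theorem pvLoopB_round_true (counts : PySem.Dict Char Int) (keys out : List Char)
    (h : keys ≠ []) :
    pvLoopB counts keys out true =
      pvLoopB (keys.foldl pvStepB (counts, out)).1
        (keys.filter fun c => decide (0 < (keys.foldl pvStepB (counts, out)).1.getD c 0))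
        (keys.foldl pvStepB (counts, out)).2 false := by
  conv_lhs => rw [pvLoopB]
  rw [if_neg h]
  rfl

theorem pvLoopB_round_false (counts : PySem.Dict Char Int) (keys out : List Char)
    (h : keys ≠ []) :
    pvLoopB counts keys out false =
      pvLoopB (keys.reverse.foldl pvStepB (counts, out)).1
        (keys.filter fun c => decide (0 < (keys.reverse.foldl pvStepB (counts, out)).1.getD c 0))
        (keys.reverse.foldl pvStepB (counts, out)).2 true := by
  conv_lhs => rw [pvLoopB]
  rw [if_neg h]
  rfl

-- the main simulation: A's double-pass loop equals B's alternating single-pass loop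
theorem pvMain (n : Nat) : ∀ (chars res : List Char) (counts : PySem.Dict Char Int)
    (keys : List Char), chars.length ≤ n → pvInv chars counts keys →
    pvLoopA chars res = pvLoopB counts keys res true := by
  induction n with
  | zero =>
    intro chars res counts keys hlen hinv
    have hnil : chars = [] := List.eq_nil_of_length_eq_zero (Nat.le_zero.mp hlen)
    subst hnil
    have hk : keys = [] := by rw [hinv.2, PySem.List.sorted_eq_nil_iff]; rfl
    rw [hk, pvLoopA_nil, pvLoopB_nil]
  | succ m ih =>
    intro chars res counts keys hlen hinv
    by_cases hnil : chars = []
    · subst hnil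
      have hk : keys = [] := by rw [hinv.2, PySem.List.sorted_eq_nil_iff]; rfl
      rw [hk, pvLoopA_nil, pvLoopB_nil]
    · obtain ⟨hnd, hpw, hmem⟩ := pvKeys_nodup chars keys hinv.2
      have hkne : keys ≠ [] := by
        intro h
        cases chars with
        | nil => exact hnil rfl
        | cons a t => exact (List.not_mem_nil (a := a)) (h ▸ (hmem a).mpr (by simp))
      have hclen : 0 < chars.length := List.length_pos_iff.mpr hnil
      have hA1 : PySem.List.sorted (PySem.Set.ofList chars) (fun x => x) false = keys :=
        hinv.2.symm
      have hpassA1 : keys.foldl pvStepA (res, chars)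
          = (res ++ keys, keys.foldl (fun l c => l.erase c) chars) :=
        pvPassA keys res chars (fun c hc => (hmem c).mp hc) hnd
      have hinv1 : pvInv (keys.foldl (fun l c => l.erase c) chars)
          (keys.foldl pvStepB (counts, res)).1
          (keys.filter fun c => decide (0 < (keys.foldl pvStepB (counts, res)).1.getD c 0)) :=
        pvInv_step chars counts keys hinv keys (fun _ => rfl)
          (keys.foldl pvStepB (counts, res)).1
          (fun v => pvStepB_foldl_getD keys counts res v)
      obtain ⟨hnd1, hpw1, hmem1⟩ := pvKeys_nodup _ _ hinv1.2
      have hlen1 : (keys.foldl (fun l c => l.erase c) chars).length < chars.length := by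
        have hlt := pvStepA_foldl_len_lt keys (res, chars)
          (by
            cases chars with
            | nil => exact absurd rfl hnil
            | cons a t => exact ⟨a, (hmem a).mpr (by simp), by simp⟩)
        rw [hpassA1] at hlt
        exact hlt
      rw [pvLoopA_round chars res hclen, hA1, hpassA1,
        pvLoopB_round_true counts keys res hkne, pvStepB_foldl_out keys counts res]
      simp only []
      by_cases h1 : keys.foldl (fun l c => l.erase c) chars = []
      · -- A breaks; B's next key list is empty, so its next round returns immediately
        have hk1nil : (keys.filter fun c =>
            decide (0 < (keys.foldl pvStepB (counts, res)).1.getD c 0)) = [] := by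
          rw [hinv1.2, h1]
          rfl
        rw [if_pos (by simp [h1]), hk1nil, pvLoopB_nil]
      · -- A's descending pass is B's second round (asc = false)
        rw [if_neg (by simp [h1])]
        have hk1ne : (keys.filter fun c =>
            decide (0 < (keys.foldl pvStepB (counts, res)).1.getD c 0)) ≠ [] := by
          intro h
          rw [hinv1.2, PySem.List.sorted_eq_nil_iff] at h
          exact h1 (pvOfList_eq_nil h)
        have hA2 : PySem.List.sorted
            (PySem.Set.ofList (keys.foldl (fun l c => l.erase c) chars)) (fun x => x) false
            = (keys.filter fun c =>
                decide (0 < (keys.foldl pvStepB (counts, res)).1.getD c 0)) :=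
          hinv1.2.symm
        have hpassA2 : (keys.filter fun c =>
              decide (0 < (keys.foldl pvStepB (counts, res)).1.getD c 0)).reverse.foldl pvStepA
              (res ++ keys, keys.foldl (fun l c => l.erase c) chars)
            = (res ++ keys ++ (keys.filter fun c =>
                  decide (0 < (keys.foldl pvStepB (counts, res)).1.getD c 0)).reverse,
                (keys.filter fun c =>
                  decide (0 < (keys.foldl pvStepB (counts, res)).1.getD c 0)).foldl
                  (fun l c => l.erase c) (keys.foldl (fun l c => l.erase c) chars)) := by
          rw [pvPassA _ _ _ (fun c hc => (hmem1 c).mp (List.mem_reverse.mp hc)) (List.nodup_reverse.mpr hnd1)]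
          rw [pvFoldlErase_reverse]
        rw [hA2, hpassA2,
          pvLoopB_round_false (keys.foldl pvStepB (counts, res)).1 _ _ hk1ne,
          pvStepB_foldl_out]
        simp only []
        have hinv2 := pvInv_step _ _ _ hinv1
          (keys.filter fun c =>
            decide (0 < (keys.foldl pvStepB (counts, res)).1.getD c 0)).reverse
          (fun v => List.count_reverse)
          ((keys.filter fun c =>
              decide (0 < (keys.foldl pvStepB (counts, res)).1.getD c 0)).reverse.foldl pvStepB
            ((keys.foldl pvStepB (counts, res)).1, res ++ keys)).1
          (fun v => pvStepB_foldl_getD _ _ _ v)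
        refine ih _ _ _ _ ?_ hinv2
        have hle := pvStepA_foldl_len_le (keys.filter fun c =>
            decide (0 < (keys.foldl pvStepB (counts, res)).1.getD c 0)).reverse
          (res ++ keys, keys.foldl (fun l c => l.erase c) chars)
        rw [hpassA2] at hle
        simp only [] at hle
        omega

-- ===== VERDICT (by name: the statement is the Claim_ definition above) =====
theorem sortString_spec : Claim_equal_sortString := by
  intro s _
  unfold Spec_sortString sortString sortString_alt
  simp only [PySem.Dict.foldl_insert_getD_add_one_eq_counter]
  congr 1
  refine pvMain s.toList.length s.toList [] _ _ le_rfl ?_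
  constructor
  · intro c
    rw [PySem.Dict.getD_counter]
  · rw [PySem.Dict.keys_counter]
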